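-- pv_equiv track=rewrite | github.com/rathan-garudas/Competitive-Programming | Sliding Window/76-Minimum-Window-Substring.py | validSubstring
-- ===== SOURCE A (Python) =====
-- def validSubstring(s, t):
--
--     freq={}
--     freq2={}
--
--     for i in t:
--         freq[i]=1+freq.get(i,0)
--     for i in s:
--         if i in freq:
--             freq2[i]=1+freq2.get(i,0)
--
--     for i in freq:
--         if i not in freq2:
--             return False
--         if i in freq2 and freq[i]>freq2[i]:
--             return False
--     return True
-- ===== SOURCE B (Python) =====
-- def validSubstring(s, t):
--     pool = list(s)
--     for c in t:
--         if c in pool: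
--             pool.remove(c)
--         else:
--             return False
--     return True
-- ===== Notes on version B (the rewrite author's own statement) =====
-- stated objective: alternative
-- what changed: Replaced A's two frequency-dictionary passes plus a key-checking loop by multiset consumption: B copies s into a mutable pool list and removes one occurrence of each character of t, returning False as soon as a removal is impossible.
import Mathlib
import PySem

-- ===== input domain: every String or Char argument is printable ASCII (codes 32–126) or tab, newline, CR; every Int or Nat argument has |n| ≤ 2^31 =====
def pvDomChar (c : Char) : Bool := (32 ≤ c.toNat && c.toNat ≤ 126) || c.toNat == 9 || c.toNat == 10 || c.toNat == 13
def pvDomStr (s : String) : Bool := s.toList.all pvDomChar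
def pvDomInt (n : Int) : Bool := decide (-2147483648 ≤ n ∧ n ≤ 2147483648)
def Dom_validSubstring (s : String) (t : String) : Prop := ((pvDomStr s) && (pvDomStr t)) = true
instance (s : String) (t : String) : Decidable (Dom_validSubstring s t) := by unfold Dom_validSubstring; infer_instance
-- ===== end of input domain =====

-- B replaces A's two frequency-dict passes and key loop by multiset consumption:
-- remove one occurrence of each char of t from a pool copy of s (objective: alternative).

-- ===== PORT A =====
-- the 'for i in freq:' early-return loop; freq[i]/freq2[i] are ported as getD _ 0,
-- exact here because the loop only reads keys present in the dicts
def pvCheckLoop (freq freq2 : PySem.Dict Char Int) : List Char → Bool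
  | [] => true
  | i :: rest =>
    if !(freq2.contains i) then false
    else if freq2.contains i && decide (freq.getD i 0 > freq2.getD i 0) then false
    else pvCheckLoop freq freq2 rest

def validSubstring (s : String) (t : String) : Bool :=
  let freq := t.toList.foldl (fun d i => d.insert i (1 + d.getD i 0)) PySem.Dict.empty
  let freq2 := s.toList.foldl
    (fun d i => if freq.contains i then d.insert i (1 + d.getD i 0) else d) PySem.Dict.empty
  pvCheckLoop freq freq2 freq.keys

-- ===== PORT B =====
-- the 'for c in t:' loop over the shrinking pool; pool.remove(c) is PySem.List.remove?
-- (its none case is unreachable because of the 'c in pool' test B makes first)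
def pvConsume : List Char → List Char → Bool
  | _, [] => true
  | pool, c :: rest =>
    if pool.contains c then
      match PySem.List.remove? pool c with
      | some pool' => pvConsume pool' rest
      | none => false
    else false

def validSubstring_alt (s : String) (t : String) : Bool :=
  pvConsume s.toList t.toList

-- ===== PRECONDITION & SPEC =====
def Spec_validSubstring (s : String) (t : String) (out : Bool) : Prop := out = validSubstring_alt s t
instance (s : String) (t : String) (out : Bool) : Decidable (Spec_validSubstring s t out) := by unfold Spec_validSubstring; infer_instance

-- ===== CLAIM (what is proved, stated in full; the proofs are below) =====
def Claim_equal_validSubstring : Prop := ∀ (s : String) (t : String), Dom_validSubstring s t → Spec_validSubstring s t (validSubstring s t)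

-- ===== LEMMAS AND PROOFS =====

theorem pv_all_congr {α : Type} (l : List α) (p q : α → Bool)
    (h : ∀ x ∈ l, p x = q x) : l.all p = l.all q := by
  induction l with
  | nil => rfl
  | cons a r ih =>
    simp only [List.all_cons, h a (by simp), ih (fun x hx => h x (by simp [hx]))]

theorem pv_checkLoop_eq_all (freq freq2 : PySem.Dict Char Int) (l : List Char) :
    pvCheckLoop freq freq2 l
      = l.all (fun i => freq2.contains i && !(decide (freq.getD i 0 > freq2.getD i 0))) := by
  induction l with
  | nil => rfl
  | cons i r ih =>
    by_cases h2 : freq2.contains i = true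
    · by_cases hg : freq.getD i 0 > freq2.getD i 0
      · simp [pvCheckLoop, h2, hg]
      · simp [pvCheckLoop, h2, hg, ih]
    · simp [pvCheckLoop, Bool.eq_false_iff.mpr h2]

theorem pv_fold_comm (d : PySem.Dict Char Int) (l : List Char) :
    l.foldl (fun d i => d.insert i (1 + d.getD i 0)) d
      = l.foldl (fun d i => d.insert i (d.getD i 0 + 1)) d := by
  have h : (fun (d : PySem.Dict Char Int) i => d.insert i (1 + d.getD i 0))
      = fun d i => d.insert i (d.getD i 0 + 1) := by
    funext d i; rw [Int.add_comm]
  rw [h]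

theorem pv_freq2_getD (freq : PySem.Dict Char Int) (l : List Char)
    (d : PySem.Dict Char Int) (c : Char) :
    (l.foldl (fun d i => if freq.contains i then d.insert i (1 + d.getD i 0) else d) d).getD c 0
      = d.getD c 0 + (if freq.contains c then (l.count c : Int) else 0) := by
  induction l generalizing d with
  | nil => simp
  | cons x r ih =>
    simp only [List.foldl_cons]
    by_cases hx : freq.contains x = true
    · rw [if_pos hx, ih]
      by_cases hc : c = x
      · subst hc
        rw [if_pos hx, PySem.Dict.getD_insert_self, List.count_cons_self, if_pos hx]
        push_cast; ring
      · rw [PySem.Dict.getD_insert_of_ne _ _ _ hc,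
            List.count_cons_of_ne (by simpa using Ne.symm hc)]
    · rw [if_neg (by simp [hx]), ih]
      by_cases hc : c = x
      · subst hc; rw [if_neg (by simp [hx]), if_neg (by simp [hx])]
      · rw [List.count_cons_of_ne (by simpa using Ne.symm hc)]

theorem pv_freq2_contains (freq : PySem.Dict Char Int) (l : List Char)
    (d : PySem.Dict Char Int) (c : Char) :
    (l.foldl (fun d i => if freq.contains i then d.insert i (1 + d.getD i 0) else d) d).contains c
      = (d.contains c || (freq.contains c && decide (c ∈ l))) := by
  induction l generalizing d with
  | nil => simp
  | cons x r ih =>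
    simp only [List.foldl_cons]
    by_cases hx : freq.contains x = true
    · rw [if_pos hx, ih, PySem.Dict.contains_insert]
      by_cases hc : c = x
      · subst hc; simp [hx]
      · have hb : (c == x) = false := beq_eq_false_iff_ne.mpr hc
        simp [hc, hb]
    · rw [if_neg (by simp [hx]), ih]
      by_cases hc : c = x
      · subst hc; simp [hx]
      · simp [hc]

-- A's result equals the per-character count comparison over set(t)
theorem pv_A_eq_all (s t : String) :
    validSubstring s t
      = (PySem.Set.ofList t.toList : List Char).all
          (fun c => decide (t.toList.count c ≤ s.toList.count c)) := by
  unfold validSubstring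
  rw [pv_checkLoop_eq_all]
  have hkeys : (t.toList.foldl (fun d i => d.insert i (1 + d.getD i 0))
      (PySem.Dict.empty : PySem.Dict Char Int)).keys = PySem.Set.ofList t.toList := by
    rw [pv_fold_comm]
    have := PySem.Dict.keys_foldl_insert t.toList
      (fun (d : PySem.Dict Char Int) x => d.getD x 0 + 1) PySem.Dict.empty
    simpa [PySem.Set.ofList_eq_foldl, PySem.Set.update, PySem.Dict.keys_empty] using this
  rw [hkeys]
  apply pv_all_congr
  intro c hc
  have hct : c ∈ t.toList := (PySem.Set.mem_ofList _ _).mp hc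
  have hfreqk : (t.toList.foldl (fun d i => d.insert i (1 + d.getD i 0))
      (PySem.Dict.empty : PySem.Dict Char Int)).contains c = true := by
    rw [PySem.Dict.contains_iff_mem_keys, hkeys]; exact hc
  have hfreqD : (t.toList.foldl (fun d i => d.insert i (1 + d.getD i 0))
      (PySem.Dict.empty : PySem.Dict Char Int)).getD c 0 = (t.toList.count c : Int) := by
    rw [pv_fold_comm, PySem.Dict.getD_foldl_insert_add_one, PySem.Dict.getD_empty]
    simp
  rw [pv_freq2_contains, pv_freq2_getD, hfreqk, hfreqD,
      PySem.Dict.contains_empty, PySem.Dict.getD_empty]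
  simp only [Bool.false_or, Bool.true_and, Int.zero_add]
  have htc : 1 ≤ t.toList.count c := List.one_le_count_iff.mpr hct
  rcases Nat.lt_or_ge (s.toList.count c) (t.toList.count c) with hlt | hge
  · have hrhs : decide (t.toList.count c ≤ s.toList.count c) = false := by
      simp; omega
    rw [hrhs]
    by_cases hcs : c ∈ s.toList
    · have hgt : ((s.toList.count c : Int) < (t.toList.count c : Int)) := by
        exact_mod_cast hlt
      simp [hgt]
    · simp [hcs]
  · have hcs : c ∈ s.toList := List.one_le_count_iff.mp (by omega)
    have hngt : ¬ ((s.toList.count c : Int) < (t.toList.count c : Int)) := by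
      omega
    simp [hcs, hngt, hge]

-- A's value characterised by per-character counts
theorem pv_A_char (s t : String) :
    validSubstring s t = true ↔ ∀ c ∈ t.toList, t.toList.count c ≤ s.toList.count c := by
  rw [pv_A_eq_all]
  simp only [List.all_eq_true, decide_eq_true_eq]
  constructor
  · intro h c hc; exact h c ((PySem.Set.mem_ofList _ _).mpr hc)
  · intro h c hc; exact h c ((PySem.Set.mem_ofList _ _).mp hc)

-- B's value characterised by per-character counts
theorem pv_consume_char (l pool : List Char) :
    pvConsume pool l = true ↔ ∀ c, l.count c ≤ pool.count c := by
  induction l generalizing pool with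
  | nil => simp [pvConsume]
  | cons c rest ih =>
    by_cases hm : c ∈ pool
    · have hrm := PySem.List.remove?_eq_some_erase pool c hm
      have hcont : pool.contains c = true := by simpa using hm
      simp only [pvConsume, hcont, if_pos, hrm]
      rw [ih]
      have hpc : 1 ≤ pool.count c := List.one_le_count_iff.mpr hm
      constructor
      · intro h d
        have := h d
        simp only [List.count_erase] at this
        simp only [List.count_cons]
        by_cases hd : d = c
        · subst hd; simp at this ⊢; omega
        · have hcd : ¬ c = d := fun h => hd h.symm
          simp [hcd] at this ⊢; omega
      · intro h d
        have := h d
        simp only [List.count_cons] at this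
        simp only [List.count_erase]
        by_cases hd : d = c
        · subst hd; simp at this ⊢; omega
        · have hcd : ¬ c = d := fun h => hd h.symm
          simp [hcd] at this ⊢; omega
    · have hcont : pool.contains c = false := by simpa using hm
      simp only [pvConsume, hcont, Bool.false_eq_true, if_false]
      constructor
      · intro h; exact absurd h (by simp)
      · intro h
        have := h c
        rw [List.count_cons_self, List.count_eq_zero_of_not_mem hm] at this
        omega

-- ===== VERDICT (by name: the statement is the Claim_ definition above) =====
theorem validSubstring_spec : Claim_equal_validSubstring := by
  intro s t _hdom
  unfold Spec_validSubstring validSubstring_alt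
  rw [Bool.eq_iff_iff, pv_A_char, pv_consume_char]
  constructor
  · intro h c
    by_cases hc : c ∈ t.toList
    · exact h c hc
    · rw [List.count_eq_zero_of_not_mem hc]; omega
  · intro h c _; exact h c
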